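-- pv_equiv track=rewrite | github.com/FiMart/Data-Structure | Chapter 7 Tree 1 (Binary Search Tree)/64010315_Ch7-5_Expression Tree.py | postToPre
-- ===== SOURCE A (Python) =====
-- def postToPre(postExp):
--     l = []
--     for i in range(len(postExp)):
--         if (postExp[i]in "+-*/"):
--             Op1 = l[-1]
--             l.pop()
--             Op2 = l[-1]
--             l.pop()
--             temp = postExp[i] + Op2 + Op1
--             l.append(temp)
--         else:
--             l.append(postExp[i])
--     ans = ""
--     for i in l:
--         ans += i
--     return ans
-- ===== SOURCE B (Python) =====
-- def postToPre(postExp):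
--     # stack of expression-tree nodes: (char, left, right); leaves have left=right=None
--     stack = []
--     for c in postExp:
--         if c in "+-*/":
--             right = stack.pop()
--             left = stack.pop()
--             stack.append((c, left, right))
--         else:
--             stack.append((c, None, None))
--
--     def pre(node):
--         c, left, right = node
--         if left is None:
--             return c
--         return c + pre(left) + pre(right)
--
--     return "".join(pre(n) for n in stack)
-- ===== Notes on version B (the rewrite author's own statement) =====
-- stated objective: alternative
-- what changed: B builds an explicit expression-tree stack (operand = leaf, operator = node over two popped subtrees) and produces the answer by a recursive preorder traversal joined over the leftover stack, instead of A's stack of already-concatenated prefix strings.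
import Mathlib
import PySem

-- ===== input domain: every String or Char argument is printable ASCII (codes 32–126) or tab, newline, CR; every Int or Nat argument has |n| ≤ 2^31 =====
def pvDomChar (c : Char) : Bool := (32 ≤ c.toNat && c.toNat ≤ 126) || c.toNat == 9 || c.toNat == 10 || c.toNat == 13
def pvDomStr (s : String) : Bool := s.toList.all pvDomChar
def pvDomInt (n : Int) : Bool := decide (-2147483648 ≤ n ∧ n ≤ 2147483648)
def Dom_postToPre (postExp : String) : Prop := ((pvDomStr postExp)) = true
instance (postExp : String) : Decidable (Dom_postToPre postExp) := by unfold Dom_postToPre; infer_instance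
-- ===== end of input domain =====

-- B replaces A's stack of prefix strings by a stack of expression-tree nodes plus a
-- recursive preorder traversal; same result, a different decomposition (not faster).


-- ===== PORT A =====
-- strings on the stack are kept as List Char (Lean's String.append is kernel-opaque);
-- 'postExp[i] in "+-*/"' is ported as membership in the char list ['+','-','*','/'] (exact,
-- since postExp[i] is a single character). Stack top is the list END, as in Python
-- (append = l ++ [x], l[-1] = getLast?, pop = dropLast); on underflow (excluded by
-- Pre_postToPre, where Python raises IndexError) getLast? is defaulted to [].
def postToPreStep (l : List (List Char)) (c : Char) : List (List Char) :=
  if c ∈ ['+', '-', '*', '/'] then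
    let op1 := (l.getLast?).getD []
    let l1 := l.dropLast
    let op2 := (l1.getLast?).getD []
    let l2 := l1.dropLast
    l2 ++ [c :: (op2 ++ op1)]
  else
    l ++ [[c]]

def postToPre (postExp : String) : String :=
  let l := postExp.toList.foldl postToPreStep []
  String.mk (l.foldl (fun ans i => ans ++ i) [])

-- ===== PORT B =====
-- expression tree: a leaf for an operand char, a node for an operator over two subtrees
inductive ETree where
  | leaf : Char → ETree
  | node : Char → ETree → ETree → ETree
deriving DecidableEq, Repr

-- the recursive 'pre' of Source B (value, then left subtree, then right subtree)
def ETree.pre : ETree → List Char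
  | .leaf c => [c]
  | .node c lt rt => c :: (lt.pre ++ rt.pre)

def postToPreAltStep (stack : List ETree) (c : Char) : List ETree :=
  if c ∈ ['+', '-', '*', '/'] then
    let right := (stack.getLast?).getD (ETree.leaf c)
    let s1 := stack.dropLast
    let left := (s1.getLast?).getD (ETree.leaf c)
    let s2 := s1.dropLast
    s2 ++ [ETree.node c left right]
  else
    stack ++ [ETree.leaf c]

def postToPre_alt (postExp : String) : String :=
  let stack := postExp.toList.foldl postToPreAltStep []
  String.mk ((stack.map ETree.pre).flatten)

-- ===== PRECONDITION & SPEC =====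
def pvIsOp (c : Char) : Bool := decide (c ∈ ['+', '-', '*', '/'])

-- Pre_ excludes exactly the inputs on which A (and B) raise IndexError: an operator
-- reached with fewer than two items on the stack (stack height before position i is
-- #operands − #operators of the prefix).
def Pre_postToPre (postExp : String) : Prop :=
  ∀ i < postExp.toList.length,
    pvIsOp (postExp.toList.getD i ' ') = true →
    (postExp.toList.take i).countP pvIsOp + 2 ≤
      (postExp.toList.take i).countP (fun c => !pvIsOp c)

instance (postExp : String) : Decidable (Pre_postToPre postExp) := by
  unfold Pre_postToPre; infer_instance

def pvWitness_postToPre : String := "ab+c*"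

def Spec_postToPre (postExp : String) (out : String) : Prop := out = postToPre_alt postExp
instance (postExp : String) (out : String) : Decidable (Spec_postToPre postExp out) := by unfold Spec_postToPre; infer_instance

-- ===== CLAIM (what is proved, stated in full; the proofs are below) =====
def Claim_equal_postToPre : Prop := ∀ (postExp : String), Dom_postToPre postExp → Pre_postToPre postExp → Spec_postToPre postExp (postToPre postExp)

-- ===== LEMMAS AND PROOFS =====

-- no-underflow invariant, phrased along the scan: n = current stack height
def pvOk (n : Nat) : List Char → Prop
  | [] => True
  | c :: cs => if pvIsOp c then 2 ≤ n ∧ pvOk (n - 1) cs else pvOk (n + 1) cs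

theorem pvOk_of_counts (cs : List Char) (n : Nat)
    (h : ∀ i < cs.length, pvIsOp (cs.getD i ' ') = true →
      (cs.take i).countP pvIsOp + 2 ≤ (cs.take i).countP (fun c => !pvIsOp c) + n) :
    pvOk n cs := by
  induction cs generalizing n with
  | nil => trivial
  | cons c cs ih =>
    by_cases hc : pvIsOp c = true
    · refine (by simp [pvOk, hc] : pvOk n (c :: cs) ↔ 2 ≤ n ∧ pvOk (n - 1) cs).mpr ⟨?_, ?_⟩
      · have := h 0 (by simp) (by simpa using hc)
        simpa using this
      · have h2 : 2 ≤ n := by have := h 0 (by simp) (by simpa using hc); simpa using this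
        refine ih (n - 1) ?_
        intro i hi hop
        have := h (i + 1) (by simpa using Nat.succ_lt_succ hi) (by simpa using hop)
        simp [List.take_succ_cons, hc] at this
        omega
    · refine (by simp [pvOk, hc] : pvOk n (c :: cs) ↔ pvOk (n + 1) cs).mpr ?_
      refine ih (n + 1) ?_
      intro i hi hop
      have := h (i + 1) (by simpa using Nat.succ_lt_succ hi) (by simpa using hop)
      simp [List.take_succ_cons, hc] at this
      omega

-- one step of A equals one step of B through the preorder projection (stack high enough)
theorem pvStep_agree (lB : List ETree) (c : Char) (h : pvIsOp c = true → 2 ≤ lB.length) :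
    postToPreStep (lB.map ETree.pre) c = (postToPreAltStep lB c).map ETree.pre := by
  by_cases hc : c ∈ ['+', '-', '*', '/']
  · have h2 : 2 ≤ lB.length := h (by simpa [pvIsOp] using hc)
    obtain ⟨u, a, b, rfl⟩ : ∃ u a b, lB = u ++ [a, b] := by
      rcases List.eq_nil_or_concat lB with rfl | ⟨l1, b, rfl⟩
      · simp at h2
      · rcases List.eq_nil_or_concat l1 with rfl | ⟨u, a, rfl⟩
        · simp at h2
        · exact ⟨u, a, b, by simp⟩
    rw [show u ++ [a, b] = (u ++ [a]) ++ [b] from by simp]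
    simp only [postToPreStep, postToPreAltStep, if_pos hc, List.map_append,
      List.getLast?_concat, List.dropLast_concat, List.map_cons, List.map_nil,
      Option.getD_some]
    simp [ETree.pre]
  · simp [postToPreStep, postToPreAltStep, hc, ETree.pre]

-- the whole scan agrees, given the no-underflow invariant
theorem pvFold_agree (cs : List Char) (lB : List ETree) (h : pvOk lB.length cs) :
    cs.foldl postToPreStep (lB.map ETree.pre) = (cs.foldl postToPreAltStep lB).map ETree.pre := by
  induction cs generalizing lB with
  | nil => rfl
  | cons c cs ih =>
    by_cases hc : pvIsOp c = true
    · have h' : 2 ≤ lB.length ∧ pvOk (lB.length - 1) cs := by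
        simpa [pvOk, hc] using h
      have hstep := pvStep_agree lB c (fun _ => h'.1)
      have hlen : (postToPreAltStep lB c).length = lB.length - 1 := by
        simp only [postToPreAltStep, if_pos (show c ∈ ['+','-','*','/'] by
          simpa [pvIsOp] using hc)]
        simp
        omega
      simp only [List.foldl_cons, hstep]
      exact ih _ (by rw [hlen]; exact h'.2)
    · have h' : pvOk (lB.length + 1) cs := by simpa [pvOk, hc] using h
      have hstep := pvStep_agree lB c (fun hop => absurd hop (by simp [hc]))
      have hlen : (postToPreAltStep lB c).length = lB.length + 1 := by
        simp only [postToPreAltStep, if_neg (show ¬ c ∈ ['+','-','*','/'] by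
          simpa [pvIsOp] using hc)]
        simp
      simp only [List.foldl_cons, hstep]
      exact ih _ (by rw [hlen]; exact h')

theorem pvFoldl_append_flatten (acc : List Char) (L : List (List Char)) :
    L.foldl (fun ans i => ans ++ i) acc = acc ++ L.flatten := by
  induction L generalizing acc with
  | nil => simp
  | cons x xs ih => simp [List.flatten, ih]

-- ===== VERDICT (by name: the statement is the Claim_ definition above) =====
theorem postToPre_spec : Claim_equal_postToPre := by
  intro postExp _ hpre
  unfold Spec_postToPre postToPre postToPre_alt
  have hok : pvOk ((([] : List ETree)).length) postExp.toList := by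
    refine pvOk_of_counts _ _ ?_
    intro i hi hop
    have := hpre i hi hop
    simpa using this
  have := pvFold_agree postExp.toList [] hok
  simp only [List.map_nil] at this
  simp only [this, pvFoldl_append_flatten, List.nil_append]
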